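-- pv_equiv track=rewrite | github.com/dp1-crypto/conferencia-folha | app.py | match_names_beneficio
-- ===== SOURCE A (Python) =====
-- def _abbrev_match(fw_list: list, ew_list: list) -> bool:
--     """
--     Verifica se fw_list (nomes da fatura, possivelmente abreviados) representa
--     a mesma pessoa que ew_list (nomes completos do extrato).
--     Regras:
--     - Primeira palavra deve coincidir exatamente
--     - Palavras de 1 letra são tratadas como inicial — "O" bate com "OLIVEIRA"
--     - Palavras do extrato podem ser puladas (nomes do meio ausentes na fatura)
--     """
--     if not fw_list or not ew_list or fw_list[0] != ew_list[0]:
--         return False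
--     fi, ei = 1, 1
--     while fi < len(fw_list) and ei < len(ew_list):
--         fw, ew = fw_list[fi], ew_list[ei]
--         if fw == ew:
--             fi += 1; ei += 1
--         elif len(fw) == 1 and ew.startswith(fw):
--             fi += 1; ei += 1
--         else:
--             ei += 1  # pula palavra do extrato (nome do meio não abreviado)
--     return fi == len(fw_list)
--
-- def match_names_beneficio(fatura: dict, extrato: dict) -> dict:
--     """
--     Casa nomes da fatura (truncados/abreviados) com nomes completos do extrato.
--     Retorna: {fatura_key → extrato_key}
--     """
--     mapping = {}
--     used = set()
--
--     for fk in fatura: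
--         fk_words = fk.split()
--         best = None
--
--         # 1) Prefixo exato (fatura é prefixo do extrato)
--         for ek in extrato:
--             if ek in used: continue
--             ek_words = ek.split()
--             if ek_words[:len(fk_words)] == fk_words:
--                 best = ek; break
--
--         # 2) Match com abreviações (ex: "christiane o santos" = "christiane oliveira dos santos")
--         if not best:
--             for ek in extrato:
--                 if ek in used: continue
--                 if _abbrev_match(fk_words, ek.split()):
--                     best = ek; break
--
--         # 3) Primeiras 2 palavras exatas (fallback)
--         if not best:
--             for ek in extrato:
--                 if ek in used: continue
--                 if ek.split()[:2] == fk_words[:2]: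
--                     best = ek; break
--
--         if best:
--             mapping[fk] = best
--             used.add(best)
--
--     return mapping
-- ===== SOURCE B (Python) =====
-- def _tail_abbrev(fw_rest, ew_rest):
--     """fw_rest/ew_rest are the words after the (already equal) first word.
--     Each fatura word must match the next unscanned extrato word, exactly or
--     as a one-letter initial; extrato words may be skipped in between."""
--     it = iter(ew_rest)
--     return all(
--         any(f == e or (len(f) == 1 and e.startswith(f)) for e in it)
--         for f in fw_rest
--     )
--
-- def match_names_beneficio(fatura: dict, extrato: dict) -> dict:
--     # Index extrato keys by their first word (order preserved): each phase
--     # then scans only the same-first-word group instead of all of extrato.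
--     index = {}
--     for ek in extrato:
--         ew = ek.split()
--         if ew:
--             index.setdefault(ew[0], []).append(ek)
--
--     mapping = {}
--     used = set()
--     for fk in fatura:
--         ws = fk.split()
--         if not ws:
--             # a whitespace-only fatura key is a trivial prefix of anything
--             best = next((ek for ek in extrato if ek not in used), None)
--         else:
--             p1 = p2 = p3 = None  # first hit of each phase, one pass
--             n = len(ws)
--             for ek in index.get(ws[0], ()):
--                 if ek in used:
--                     continue
--                 ew = ek.split()
--                 if p1 is None and ew[:n] == ws:
--                     p1 = ek
--                 if p2 is None and _tail_abbrev(ws[1:], ew[1:]):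
--                     p2 = ek
--                 if p3 is None and ew[:2] == ws[:2]:
--                     p3 = ek
--             best = p1 or p2 or p3
--         if best:
--             mapping[fk] = best
--             used.add(best)
--     return mapping
-- ===== Notes on version B (the rewrite author's own statement) =====
-- stated objective: faster
-- what changed: B builds a first-word index of the extrato keys once and, per fatura key, runs all three matching phases in a single pass over only the same-first-word group (every phase's match must share the first word), instead of A's three full scans of extrato per fatura key.
import Mathlib
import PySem

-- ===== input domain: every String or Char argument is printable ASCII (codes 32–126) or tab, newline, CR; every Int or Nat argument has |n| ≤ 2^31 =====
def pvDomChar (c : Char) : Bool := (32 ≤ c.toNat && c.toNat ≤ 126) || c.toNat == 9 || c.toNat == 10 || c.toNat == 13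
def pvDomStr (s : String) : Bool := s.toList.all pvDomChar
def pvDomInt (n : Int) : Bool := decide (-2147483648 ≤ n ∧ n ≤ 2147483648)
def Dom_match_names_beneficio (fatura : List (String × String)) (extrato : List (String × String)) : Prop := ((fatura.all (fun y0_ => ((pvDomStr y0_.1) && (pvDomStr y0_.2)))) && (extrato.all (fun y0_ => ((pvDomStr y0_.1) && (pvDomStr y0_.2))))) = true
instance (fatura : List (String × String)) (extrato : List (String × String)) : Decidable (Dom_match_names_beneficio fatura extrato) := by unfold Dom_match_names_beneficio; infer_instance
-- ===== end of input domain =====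

-- B replaces A's three full scans of extrato per fatura key by a first-word index of the
-- extrato keys built once plus a single pass over the same-first-word group (objective: faster).
-- Both functions only read the dicts' KEYS; neither mutates its arguments.

-- ===== PORT A =====
-- truthiness of Python's `best` (Optional[str]): None and "" are falsy
def pvTruthy : Option String → Bool
  | none => false
  | some s => s != ""

-- the `while fi < len(fw) and ei < len(ew)` loop of _abbrev_match, from index 1
def aAbbrevLoop : List String → List String → Bool
  | [], _ => true
  | _ :: _, [] => false
  | f :: fs, e :: es =>
    if f == e then aAbbrevLoop fs es
    else if PySem.Str.len f == 1 && PySem.Str.startswith e f then aAbbrevLoop fs es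
    else aAbbrevLoop (f :: fs) es

def abbrevMatch (fw ew : List String) : Bool :=
  match fw, ew with
  | [], _ => false
  | _, [] => false
  | f :: _, e :: _ => if f != e then false else aAbbrevLoop fw.tail ew.tail

-- `for ek in extrato: if ek in used: continue; if p(ek): best = ek; break`
def findBest (used : PySem.Set String) (p : String → Bool) : List String → Option String
  | [] => none
  | ek :: rest =>
    if PySem.Set.contains used ek then findBest used p rest
    else if p ek then some ek else findBest used p rest

def aStep (eks : List String) (st : PySem.Dict String String × PySem.Set String) (fk : String) :
    PySem.Dict String String × PySem.Set String :=
  let ws := PySem.Str.split₀ fk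
  let b1 := findBest st.2 (fun ek => (PySem.Str.split₀ ek).take ws.length == ws) eks
  let b2 := if pvTruthy b1 then b1 else findBest st.2 (fun ek => abbrevMatch ws (PySem.Str.split₀ ek)) eks
  let b3 := if pvTruthy b2 then b2 else findBest st.2 (fun ek => (PySem.Str.split₀ ek).take 2 == ws.take 2) eks
  match b3 with
  | some b => if b != "" then (st.1.insert fk b, PySem.Set.add st.2 b) else st
  | none => st

def match_names_beneficio (fatura : List (String × String)) (extrato : List (String × String)) : List (String × String) :=
  let eks := PySem.List.dedup (extrato.map Prod.fst)
  let fks := PySem.List.dedup (fatura.map Prod.fst)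
  (fks.foldl (aStep eks) (PySem.Dict.empty, PySem.Set.empty)).1.items

-- ===== PORT B =====
-- `index.setdefault(ew[0], []).append(ek)` guarded by `if ew:`
def bIndexStep (d : PySem.Dict String (List String)) (ek : String) : PySem.Dict String (List String) :=
  match (PySem.Str.split₀ ek).head? with
  | some w => d.modify w [] (· ++ [ek])
  | none => d

-- `any(f == e or (len(f) == 1 and e.startswith(f)) for e in it)`: consume until a match
def bFindRest (f : String) : List String → Option (List String)
  | [] => none
  | e :: es => if f == e || (PySem.Str.len f == 1 && PySem.Str.startswith e f) then some es else bFindRest f es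

-- `all(any(...) for f in fw_rest)` over the shared iterator
def bTailAbbrev : List String → List String → Bool
  | [], _ => true
  | f :: fs, ews =>
    match bFindRest f ews with
    | some rest => bTailAbbrev fs rest
    | none => false

-- Python `x or y` on Optional[str]
def pvOrTruthy (a b : Option String) : Option String := if pvTruthy a then a else b

-- the single pass over the group, filling the three phase slots
def bScanStep (used : PySem.Set String) (ws : List String)
    (st : Option String × Option String × Option String) (ek : String) :
    Option String × Option String × Option String :=
  if PySem.Set.contains used ek then st
  else
    let ew := PySem.Str.split₀ ek
    (if st.1.isNone && (ew.take ws.length == ws) then some ek else st.1,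
     if st.2.1.isNone && bTailAbbrev ws.tail ew.tail then some ek else st.2.1,
     if st.2.2.isNone && (ew.take 2 == ws.take 2) then some ek else st.2.2)

-- `next((ek for ek in extrato if ek not in used), None)`
def bFirstUnused (used : PySem.Set String) : List String → Option String
  | [] => none
  | ek :: rest => if PySem.Set.contains used ek then bFirstUnused used rest else some ek

-- `if not ws: ... else: ...` — the per-key best match
def bBest (eks : List String) (index : PySem.Dict String (List String))
    (used : PySem.Set String) : List String → Option String
  | [] => bFirstUnused used eks
  | w :: rest =>
    let r := (index.getD w []).foldl (bScanStep used (w :: rest)) (none, none, none)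
    pvOrTruthy r.1 (pvOrTruthy r.2.1 r.2.2)

def bStep (eks : List String) (index : PySem.Dict String (List String))
    (st : PySem.Dict String String × PySem.Set String) (fk : String) :
    PySem.Dict String String × PySem.Set String :=
  match bBest eks index st.2 (PySem.Str.split₀ fk) with
  | some b => if b != "" then (st.1.insert fk b, PySem.Set.add st.2 b) else st
  | none => st

def match_names_beneficio_alt (fatura : List (String × String)) (extrato : List (String × String)) : List (String × String) :=
  let eks := PySem.List.dedup (extrato.map Prod.fst)
  let index := eks.foldl bIndexStep PySem.Dict.empty
  let fks := PySem.List.dedup (fatura.map Prod.fst)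
  (fks.foldl (bStep eks index) (PySem.Dict.empty, PySem.Set.empty)).1.items

-- ===== PRECONDITION & SPEC =====
def Spec_match_names_beneficio (fatura : List (String × String)) (extrato : List (String × String)) (out : List (String × String)) : Prop := out = match_names_beneficio_alt fatura extrato
instance (fatura : List (String × String)) (extrato : List (String × String)) (out : List (String × String)) : Decidable (Spec_match_names_beneficio fatura extrato out) := by unfold Spec_match_names_beneficio; infer_instance

-- ===== CLAIM (what is proved, stated in full; the proofs are below) =====
def Claim_equal_match_names_beneficio : Prop := ∀ (fatura : List (String × String)) (extrato : List (String × String)), Dom_match_names_beneficio fatura extrato → Spec_match_names_beneficio fatura extrato (match_names_beneficio fatura extrato)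

-- ===== LEMMAS AND PROOFS =====

-- A's skip-loop equals B's shared-iterator formulation
theorem bTailAbbrev_eq_aAbbrevLoop (ews fws : List String) :
    bTailAbbrev fws ews = aAbbrevLoop fws ews := by
  induction ews generalizing fws with
  | nil => cases fws <;> simp [bTailAbbrev, aAbbrevLoop, bFindRest]
  | cons e es ih =>
    cases fws with
    | nil => simp [bTailAbbrev, aAbbrevLoop]
    | cons f fs =>
      by_cases h1 : (f == e) = true
      · simp [bTailAbbrev, aAbbrevLoop, bFindRest, h1, ih]
      · by_cases h2 : f.length = 1 ∧ PySem.Chars.startswith e.toList f.toList = true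
        · simp [bTailAbbrev, aAbbrevLoop, bFindRest, h1, h2, ih]
        · have hrec := ih (f :: fs)
          simp only [bTailAbbrev] at hrec
          simp [bTailAbbrev, aAbbrevLoop, bFindRest, h1, h2, hrec]

-- the group stored in the index is the first-word filter of eks
theorem getD_index (eks : List String) (w : String) (d : PySem.Dict String (List String)) :
    (eks.foldl bIndexStep d).getD w [] =
      d.getD w [] ++ eks.filter (fun ek => (PySem.Str.split₀ ek).head? == some w) := by
  induction eks generalizing d with
  | nil => simp
  | cons ek rest ih =>
    simp only [List.foldl_cons, List.filter_cons]
    cases hw : (PySem.Str.split₀ ek).head? with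
    | none => simp [bIndexStep, hw, ih]
    | some v =>
      by_cases hv : w = v
      · subst hv
        simp [bIndexStep, hw, ih]
      · simp [bIndexStep, hw, ih, PySem.Dict.getD_modify, hv, Ne.symm hv]

-- scanning a filtered list is the same when the predicate implies the filter
theorem findBest_filter (used : PySem.Set String) (p q : String → Bool)
    (h : ∀ x, p x = true → q x = true) (l : List String) :
    findBest used p (l.filter q) = findBest used p l := by
  induction l with
  | nil => rfl
  | cons a l ih =>
    by_cases hq : q a = true
    · simp only [List.filter_cons, hq, if_true, findBest, ih]
    · have hp : p a = false := by
        cases hpa : p a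
        · rfl
        · exact absurd (h a hpa) (by simp [hq])
      simp [hq, findBest, hp, ih]

-- predicates agreeing on the list give the same scan
theorem findBest_congr_mem (used : PySem.Set String) (p q : String → Bool) (l : List String)
    (h : ∀ x ∈ l, p x = q x) : findBest used p l = findBest used q l := by
  induction l with
  | nil => rfl
  | cons a l ih =>
    have ha := h a (by simp)
    simp only [findBest, ha]
    rw [ih (fun x hx => h x (by simp [hx]))]

theorem findBest_false (used : PySem.Set String) (l : List String)
    (p : String → Bool) (h : ∀ x, p x = false) : findBest used p l = none := by
  induction l with
  | nil => rfl
  | cons a l ih => simp [findBest, h a, ih]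

theorem findBest_true_eq_bFirstUnused (used : PySem.Set String) (l : List String)
    (p : String → Bool) (h : ∀ x, p x = true) : findBest used p l = bFirstUnused used l := by
  induction l with
  | nil => rfl
  | cons a l ih => simp [findBest, bFirstUnused, h a, ih]

theorem bFirstUnused_none (used : PySem.Set String) (l : List String)
    (h : bFirstUnused used l = none) (p : String → Bool) : findBest used p l = none := by
  induction l with
  | nil => rfl
  | cons a l ih =>
    by_cases hu : a ∈ used
    · simp [bFirstUnused, hu] at h
      simp [findBest, hu, ih h]
    · simp [bFirstUnused, hu] at h

theorem bFirstUnused_some (used : PySem.Set String) (l : List String) (x : String)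
    (h : bFirstUnused used l = some x) (p : String → Bool) (hp : p x = true) :
    findBest used p l = some x := by
  induction l with
  | nil => simp [bFirstUnused] at h
  | cons a l ih =>
    by_cases hu : a ∈ used
    · simp [bFirstUnused, hu] at h
      simp [findBest, hu, ih h]
    · simp [bFirstUnused, hu] at h
      subst h
      simp [findBest, hu, hp]

theorem slot_eq (o : Option String) (b : Bool) (a : String) (rest : Option String) :
    ((if o.isNone && b then some a else o).orElse (fun _ => rest)) =
      o.orElse (fun _ => if b then some a else rest) := by
  cases o <;> cases b <;> simp

-- B's one-pass three-slot fold computes the three findBest scans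
theorem bScan_fold (used : PySem.Set String) (ws : List String) (l : List String)
    (o1 o2 o3 : Option String) :
    l.foldl (bScanStep used ws) (o1, o2, o3) =
      ((o1.orElse (fun _ => findBest used (fun ek => (PySem.Str.split₀ ek).take ws.length == ws) l)),
       (o2.orElse (fun _ => findBest used (fun ek => bTailAbbrev ws.tail (PySem.Str.split₀ ek).tail) l)),
       (o3.orElse (fun _ => findBest used (fun ek => (PySem.Str.split₀ ek).take 2 == ws.take 2) l))) := by
  induction l generalizing o1 o2 o3 with
  | nil => cases o1 <;> cases o2 <;> cases o3 <;> simp [findBest]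
  | cons a l ih =>
    by_cases hu : used.contains a = true
    · simp only [List.foldl_cons, bScanStep, hu, if_true, ih, findBest]
    · have hc : used.contains a = false := by simpa using hu
      simp only [List.foldl_cons, bScanStep, hc, Bool.false_eq_true, if_false]
      rw [ih]
      simp only [findBest, hc, Bool.false_eq_true, if_false]
      refine Prod.ext ?_ (Prod.ext ?_ ?_) <;> exact slot_eq _ _ _ _

theorem pvOrTruthy_assoc (a b c : Option String) :
    pvOrTruthy (pvOrTruthy a b) c = pvOrTruthy a (pvOrTruthy b c) := by
  by_cases ha : pvTruthy a = true <;> simp [pvOrTruthy, ha]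

-- the per-fatura-key steps agree
theorem step_eq (eks : List String) (st : PySem.Dict String String × PySem.Set String) (fk : String) :
    aStep eks st fk = bStep eks (eks.foldl bIndexStep PySem.Dict.empty) st fk := by
  simp only [aStep, bStep]
  cases hws : PySem.Str.split₀ fk with
  | nil =>
    simp only [bBest]
    have h1 : findBest st.2 (fun ek => (PySem.Str.split₀ ek).take (List.length ([] : List String)) == ([] : List String)) eks
        = bFirstUnused st.2 eks :=
      findBest_true_eq_bFirstUnused _ _ _ (by intro x; simp)
    have h2 : findBest st.2 (fun ek => abbrevMatch [] (PySem.Str.split₀ ek)) eks = none :=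
      findBest_false _ _ _ (fun x => rfl)
    rw [h1, h2]
    cases hfu : bFirstUnused st.2 eks with
    | none =>
      rw [bFirstUnused_none st.2 eks hfu]
      rfl
    | some e0 =>
      by_cases he : e0 = ""
      · subst he
        rw [bFirstUnused_some st.2 eks "" hfu _ (by decide)]
        rfl
      · have : pvTruthy (some e0) = true := by simp [pvTruthy, he]
        simp [this]
  | cons w rest =>
    simp only [bBest]
    have hg : (eks.foldl bIndexStep PySem.Dict.empty).getD w [] =
        eks.filter (fun ek => (PySem.Str.split₀ ek).head? == some w) := by
      rw [getD_index]; simp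
    rw [hg, bScan_fold]
    simp only [Option.orElse, List.tail_cons]
    have himp1 : ∀ x : String,
        ((PySem.Str.split₀ x).take (w :: rest).length == (w :: rest)) = true →
        ((PySem.Str.split₀ x).head? == some w) = true := by
      intro x hx
      simp only [beq_iff_eq] at hx ⊢
      cases hsx : PySem.Str.split₀ x with
      | nil => rw [hsx] at hx; simp at hx
      | cons a t =>
        rw [hsx] at hx
        simp only [List.length_cons, List.take_succ_cons, List.cons.injEq] at hx
        simp [hx.1]
    have himp2 : ∀ x : String,
        (abbrevMatch (w :: rest) (PySem.Str.split₀ x)) = true →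
        ((PySem.Str.split₀ x).head? == some w) = true := by
      intro x hx
      cases hsx : PySem.Str.split₀ x with
      | nil => rw [hsx] at hx; simp [abbrevMatch] at hx
      | cons a t =>
        rw [hsx] at hx
        simp only [abbrevMatch] at hx
        by_cases haw : (w != a) = true
        · simp [haw] at hx
        · simp only [bne_iff_ne, ne_eq, not_not] at haw
          simp [haw]
    have himp3 : ∀ x : String,
        ((PySem.Str.split₀ x).take 2 == (w :: rest).take 2) = true →
        ((PySem.Str.split₀ x).head? == some w) = true := by
      intro x hx
      simp only [beq_iff_eq] at hx ⊢
      cases hsx : PySem.Str.split₀ x with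
      | nil => rw [hsx] at hx; simp at hx
      | cons a t =>
        rw [hsx] at hx
        simp only [List.take_succ_cons, List.cons.injEq] at hx
        simp [hx.1]
    rw [← findBest_filter st.2 _ _ himp1 eks, ← findBest_filter st.2 _ _ himp2 eks,
        ← findBest_filter st.2 _ _ himp3 eks]
    have hcong : findBest st.2 (fun ek => abbrevMatch (w :: rest) (PySem.Str.split₀ ek))
          (eks.filter (fun ek => (PySem.Str.split₀ ek).head? == some w))
        = findBest st.2 (fun ek => bTailAbbrev rest (PySem.Str.split₀ ek).tail)
          (eks.filter (fun ek => (PySem.Str.split₀ ek).head? == some w)) := by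
      apply findBest_congr_mem
      intro x hxmem
      have hq : ((PySem.Str.split₀ x).head? == some w) = true := (List.mem_filter.mp hxmem).2
      cases hsx : PySem.Str.split₀ x with
      | nil => rw [hsx] at hq; simp at hq
      | cons a t =>
        rw [hsx] at hq
        simp only [List.head?_cons, beq_iff_eq, Option.some.injEq] at hq
        subst hq
        simp [abbrevMatch, bTailAbbrev_eq_aAbbrevLoop]
    rw [hcong]
    have hchain : ∀ (b1 b2 b3 : Option String),
        (if pvTruthy (if pvTruthy b1 then b1 else b2) then (if pvTruthy b1 then b1 else b2) else b3)
          = pvOrTruthy b1 (pvOrTruthy b2 b3) := by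
      intro b1 b2 b3
      rw [← pvOrTruthy_assoc]
      rfl
    rw [hchain]

-- ===== VERDICT (by name: the statement is the Claim_ definition above) =====
theorem match_names_beneficio_spec : Claim_equal_match_names_beneficio := by
  intro fatura extrato _
  unfold Spec_match_names_beneficio match_names_beneficio match_names_beneficio_alt
  have h : aStep (PySem.List.dedup (extrato.map Prod.fst)) =
      bStep (PySem.List.dedup (extrato.map Prod.fst))
        ((PySem.List.dedup (extrato.map Prod.fst)).foldl bIndexStep PySem.Dict.empty) := by
    funext st fk; exact step_eq _ _ _
  simp only [h]
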